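-- pv_equiv track=rewrite | github.com/cgraaaj/cgr-trades-test | python/option_analyze.py | check_consecutive_appearances
-- ===== SOURCE A (Python) =====
-- from collections import defaultdict
--
-- def check_consecutive_appearances(grouped_data, threshold=2):
--     # Flatten the grouped data into a sorted list of (timestamp, stock)
--     data = sorted(
--         (timestamp, item["stock"])
--         for timestamp, items in grouped_data.items()
--         for item in items
--     )
--
--     consecutive_counts = defaultdict(int)
--     previous_stock = None
--     previous_timestamp = None
--     count = 0
--     threshold_timestamp = None
--
--     for timestamp, stock in data:
--         if stock == previous_stock:
--             count += 1
--             if count == threshold: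
--                 threshold_timestamp = timestamp
--         else:
--             if count >= threshold and threshold_timestamp:
--                 consecutive_counts[previous_stock] = (count, threshold_timestamp)
--             count = 1
--             threshold_timestamp = None
--
--         previous_stock = stock
--
--     # Final check at the end of the loop
--     if count >= threshold and threshold_timestamp:
--         consecutive_counts[previous_stock] = (count, threshold_timestamp)
--
--     return consecutive_counts
-- ===== SOURCE B (Python) =====
-- from collections import defaultdict
--
--
-- def check_consecutive_appearances(grouped_data, threshold=2):
--     # Same flattening/sorting, then staged index arithmetic instead of a stateful scan.
--     data = sorted(
--         (timestamp, item["stock"])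
--         for timestamp, items in grouped_data.items()
--         for item in items
--     )
--     n = len(data)
--     # indices where a maximal same-stock run starts, plus a sentinel end
--     starts = [i for i in range(n) if i == 0 or data[i][1] != data[i - 1][1]] + [n]
--     consecutive_counts = defaultdict(int)
--     for s, e in zip(starts, starts[1:]):
--         if threshold > 1 and threshold <= e - s:
--             ts = data[s + threshold - 1][0]
--             if ts:
--                 consecutive_counts[data[s][1]] = (e - s, ts)
--     return consecutive_counts
-- ===== Notes on version B (the rewrite author's own statement) =====
-- stated objective: alternative
-- what changed: Replaces the stateful element-by-element scan (previous_stock/count/threshold_timestamp mutable state plus a duplicated trailing flush) by staged index arithmetic: a list of run-start boundary indices plus a sentinel, zipped into (start,end) ranges that are judged by direct indexing with no per-element mutable state and no run materialization.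
import Mathlib
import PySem

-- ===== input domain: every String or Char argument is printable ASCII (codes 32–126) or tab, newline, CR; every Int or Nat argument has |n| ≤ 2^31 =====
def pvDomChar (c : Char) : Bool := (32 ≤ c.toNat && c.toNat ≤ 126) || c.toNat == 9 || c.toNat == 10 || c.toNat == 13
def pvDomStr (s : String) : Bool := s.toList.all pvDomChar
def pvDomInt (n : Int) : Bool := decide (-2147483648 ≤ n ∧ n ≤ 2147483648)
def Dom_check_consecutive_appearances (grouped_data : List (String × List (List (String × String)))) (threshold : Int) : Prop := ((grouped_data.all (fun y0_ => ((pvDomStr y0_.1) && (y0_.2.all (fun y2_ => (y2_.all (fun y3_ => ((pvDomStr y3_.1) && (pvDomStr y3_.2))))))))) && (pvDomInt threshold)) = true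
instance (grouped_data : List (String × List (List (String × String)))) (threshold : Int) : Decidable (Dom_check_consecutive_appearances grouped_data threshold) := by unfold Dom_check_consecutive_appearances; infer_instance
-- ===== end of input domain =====

-- B replaces A's stateful element-by-element scan (previous_stock/count/threshold_timestamp
-- with a duplicated trailing flush) by staged index arithmetic: a run-start boundary index
-- list plus sentinel, zipped into (start,end) ranges judged by direct indexing — alternative,
-- same O(n log n) cost. Pre_ excludes inputs where an item dict lacks the key "stock"
-- (A raises KeyError there).

-- ===== PORT A =====
-- one loop iteration of A: state = (previous_stock, count, threshold_timestamp, consecutive_counts)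
def pvStepA (threshold : Int)
    (st : Option String × Int × Option String × PySem.Dict String (Int × String))
    (p : String × String) :
    Option String × Int × Option String × PySem.Dict String (Int × String) :=
  let (prev, count, ts, d) := st
  if some p.2 = prev then
    let count := count + 1
    let ts := if count = threshold then some p.1 else ts
    (some p.2, count, ts, d)
  else
    let d := if threshold ≤ count ∧ ts.getD "" ≠ "" then
               d.insert (prev.getD "") (count, ts.getD "") else d
    (some p.2, 1, none, d)

-- A's flush: `if count >= threshold and threshold_timestamp: consecutive_counts[previous_stock] = …`
-- (truthiness of threshold_timestamp = it is a nonempty string)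
def pvFlushA (threshold : Int)
    (st : Option String × Int × Option String × PySem.Dict String (Int × String)) :
    PySem.Dict String (Int × String) :=
  let (prev, count, ts, d) := st
  if threshold ≤ count ∧ ts.getD "" ≠ "" then
    d.insert (prev.getD "") (count, ts.getD "") else d

def check_consecutive_appearances (grouped_data : List (String × List (List (String × String)))) (threshold : Int) : List (String × Int × String) :=
  -- item["stock"]: first-match dict lookup; exact under Pre_ (key present)
  let data := PySem.List.sorted2
    (grouped_data.flatMap (fun g => g.2.map (fun item =>
      (g.1, ((PySem.Dict.mk item).get? "stock").getD ""))))
    (fun p => p.1) (fun p => p.2)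
  let st := data.foldl (pvStepA threshold) (none, 0, none, PySem.Dict.empty)
  (pvFlushA threshold st).items

-- ===== PORT B =====
-- `i == 0 or data[i][1] != data[i-1][1]` (i drawn from range(n), so both indexings are in range)
def pvAdjB (data : List (String × String)) (i : Nat) : Bool :=
  i == 0 || decide (((data[i]?).getD ("", "")).2 ≠ ((data[i-1]?).getD ("", "")).2)

-- B's loop body for one (start, end) pair; plain indexing data[s+threshold-1] / data[s] is in
-- range under the guard, ported exactly via pyGet? (the index is nonnegative there)
def pvStepIdx (data : List (String × String)) (threshold : Int)
    (d : PySem.Dict String (Int × String)) (se : Nat × Nat) :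
    PySem.Dict String (Int × String) :=
  if 1 < threshold ∧ threshold ≤ (se.2 : Int) - (se.1 : Int) then
    let ts := ((PySem.List.pyGet? data ((se.1 : Int) + threshold - 1)).getD ("", "")).1
    if ts ≠ "" then
      d.insert ((PySem.List.pyGet? data (se.1 : Int)).getD ("", "")).2
        ((se.2 : Int) - (se.1 : Int), ts)
    else d
  else d

def check_consecutive_appearances_alt (grouped_data : List (String × List (List (String × String)))) (threshold : Int) : List (String × Int × String) :=
  let data := PySem.List.sorted2
    (grouped_data.flatMap (fun g => g.2.map (fun item =>
      (g.1, ((PySem.Dict.mk item).get? "stock").getD ""))))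
    (fun p => p.1) (fun p => p.2)
  let n := data.length
  let starts := ((List.range n).filter (fun i => pvAdjB data i)) ++ [n]
  let pairs := starts.zip (starts.drop 1)
  (pairs.foldl (pvStepIdx data threshold) PySem.Dict.empty).items

-- ===== PRECONDITION & SPEC =====
-- Pre_ excludes exactly the inputs on which A raises KeyError: an item dict without key "stock".
def Pre_check_consecutive_appearances (grouped_data : List (String × List (List (String × String)))) (threshold : Int) : Prop :=
  ∀ g ∈ grouped_data, ∀ item ∈ g.2, "stock" ∈ item.map Prod.fst
instance (grouped_data : List (String × List (List (String × String)))) (threshold : Int) : Decidable (Pre_check_consecutive_appearances grouped_data threshold) := by unfold Pre_check_consecutive_appearances; infer_instance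

def pvWitness_check_consecutive_appearances : (List (String × List (List (String × String)))) × Int :=
  ([("t1", [[("stock", "A")]]), ("t2", [[("stock", "A")]])], 2)

def Spec_check_consecutive_appearances (grouped_data : List (String × List (List (String × String)))) (threshold : Int) (out : List (String × Int × String)) : Prop := out = check_consecutive_appearances_alt grouped_data threshold
instance (grouped_data : List (String × List (List (String × String)))) (threshold : Int) (out : List (String × Int × String)) : Decidable (Spec_check_consecutive_appearances grouped_data threshold out) := by unfold Spec_check_consecutive_appearances; infer_instance

-- ===== CLAIM (what is proved, stated in full; the proofs are below) =====
def Claim_equal_check_consecutive_appearances : Prop := ∀ (grouped_data : List (String × List (List (String × String)))) (threshold : Int), Dom_check_consecutive_appearances grouped_data threshold → Pre_check_consecutive_appearances grouped_data threshold → Spec_check_consecutive_appearances grouped_data threshold (check_consecutive_appearances grouped_data threshold)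

-- ===== LEMMAS AND PROOFS =====

-- Both ports are reduced to the same middleman: a fold of pvStepRun over the maximal
-- same-stock runs (pvCruns) of the sorted data.

-- processing of one complete run (length, threshold-th element, head stock)
def pvStepRun (threshold : Int) (d : PySem.Dict String (Int × String))
    (run : List (String × String)) : PySem.Dict String (Int × String) :=
  if 1 < threshold ∧ threshold ≤ (run.length : Int) then
    let p := (PySem.List.pyGet? run (threshold - 1)).getD ("", "")
    if p.1 ≠ "" then d.insert (run.headD ("", "")).2 ((run.length : Int), p.1) else d
  else d

-- split off the longest prefix of stock s
def pvTakeRun (s : String) : List (String × String) → List (String × String) × List (String × String)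
  | [] => ([], [])
  | y :: ys => if y.2 = s then ((y :: (pvTakeRun s ys).1), (pvTakeRun s ys).2) else ([], y :: ys)

theorem pvTakeRun_append (s : String) (l : List (String × String)) :
    (pvTakeRun s l).1 ++ (pvTakeRun s l).2 = l := by
  induction l with
  | nil => rfl
  | cons y ys ih =>
    rw [pvTakeRun]
    split_ifs with h
    · simpa using ih
    · rfl

theorem pvTakeRun_snd_length (s : String) (l : List (String × String)) :
    (pvTakeRun s l).2.length ≤ l.length := by
  induction l with
  | nil => simp [pvTakeRun]
  | cons y ys ih =>
    rw [pvTakeRun]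
    split_ifs with h
    · exact le_trans ih (by simp)
    · simp

theorem pvTakeRun_fst_stock (s : String) (l : List (String × String)) :
    ∀ p ∈ (pvTakeRun s l).1, p.2 = s := by
  induction l with
  | nil => simp [pvTakeRun]
  | cons y ys ih =>
    rw [pvTakeRun]
    split_ifs with h
    · intro p hp
      rcases List.mem_cons.mp hp with h' | h'
      · rw [h']; exact h
      · exact ih p h'
    · simp

theorem pvTakeRun_snd_head (s : String) (l : List (String × String)) :
    (pvTakeRun s l).2 = [] ∨ (((pvTakeRun s l).2.headD ("", "")).2 ≠ s) := by
  induction l with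
  | nil => left; rfl
  | cons y ys ih =>
    rw [pvTakeRun]
    split_ifs with h
    · exact ih
    · right; simpa using h

-- maximal same-stock runs of the sorted data
def pvCruns : List (String × String) → List (List (String × String))
  | [] => []
  | x :: xs => (x :: (pvTakeRun x.2 xs).1) :: pvCruns (pvTakeRun x.2 xs).2
termination_by l => l.length
decreasing_by
  simpa using Nat.lt_succ_of_le (pvTakeRun_snd_length x.2 xs)

-- ---------- A-side: A's fold = fold of pvStepRun over runs ----------

-- the run scanner A's loop simulates (accumulator form)
def pvRunsGo (prev : String × String) (acc : List (String × String)) :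
    List (String × String) → List (List (String × String))
  | [] => [acc.reverse]
  | y :: ys =>
    if y.2 = prev.2 then pvRunsGo y (y :: acc) ys
    else acc.reverse :: pvRunsGo y [y] ys

-- the threshold_timestamp A's loop carries, as a function of the run processed so far
def pvTs (threshold : Int) (r : List (String × String)) : Option String :=
  if 2 ≤ threshold ∧ threshold ≤ (r.length : Int) then
    (PySem.List.pyGet? r (threshold - 1)).map (fun p => p.1)
  else none

theorem pvTs_singleton (threshold : Int) (y : String × String) : pvTs threshold [y] = none := by
  simp [pvTs]; omega

theorem pvTs_snoc (threshold : Int) (r : List (String × String)) (y : String × String)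
    (hr : r ≠ []) :
    pvTs threshold (r ++ [y]) =
      if (r.length : Int) + 1 = threshold then some y.1 else pvTs threshold r := by
  have hlen : 1 ≤ r.length := List.length_pos_iff.mpr hr
  by_cases h : (r.length : Int) + 1 = threshold
  · have hcond : 2 ≤ threshold ∧ threshold ≤ ((r ++ [y]).length : Int) := by simp; omega
    rw [pvTs, if_pos hcond, show threshold - 1 = (r.length : Int) by omega,
      PySem.List.pyGet?_append_length, if_pos h]
    rfl
  · rw [if_neg h]
    by_cases hc : 2 ≤ threshold ∧ threshold ≤ (r.length : Int)
    · have hi : (threshold - 1).toNat < r.length := by omega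
      have h0 : (0:Int) ≤ threshold - 1 := by omega
      rw [pvTs, pvTs, if_pos hc, if_pos ⟨hc.1, by simp; omega⟩,
        PySem.List.pyGet?_of_nonneg _ h0, PySem.List.pyGet?_of_nonneg _ h0,
        List.getElem?_append_left hi]
    · rw [pvTs, pvTs, if_neg hc, if_neg (by simp; omega)]

-- A's flush on the state after a full run r of stock s equals pvStepRun on r
theorem pvFlush_eq_stepRun (threshold : Int) (s : String) (r : List (String × String))
    (d : PySem.Dict String (Int × String)) (hr : r ≠ []) (hs : ∀ p ∈ r, p.2 = s) :
    pvFlushA threshold (some s, (r.length : Int), pvTs threshold r, d) = pvStepRun threshold d r := by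
  by_cases hc : 2 ≤ threshold ∧ threshold ≤ (r.length : Int)
  · have h0 : (0:Int) ≤ threshold - 1 := by omega
    have hi : threshold.toNat - 1 < r.length := by omega
    have hget : PySem.List.pyGet? r (threshold - 1) = some r[threshold.toNat - 1] := by
      rw [PySem.List.pyGet?_of_nonneg _ h0,
        show (threshold - 1).toNat = threshold.toNat - 1 from by omega,
        List.getElem?_eq_getElem hi]
    have hhead : (r.headD ("", "")).2 = s := by
      cases r with
      | nil => exact absurd rfl hr
      | cons a t => exact hs a (by simp)
    simp only [pvFlushA, pvTs, if_pos hc, pvStepRun, hget, Option.map_some, Option.getD_some,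
      hhead, if_pos (show 1 < threshold ∧ threshold ≤ (r.length : Int) from ⟨by omega, hc.2⟩)]
    by_cases hne : r[threshold.toNat - 1].1 = ""
    · rw [if_neg (by simp [hne, hc.2]), if_neg (by simp [hne])]
    · rw [if_pos ⟨hc.2, hne⟩, if_pos hne]
  · simp only [pvFlushA, pvTs, if_neg hc, pvStepRun]
    have h1 : ¬ (1 < threshold ∧ threshold ≤ (r.length : Int)) := by omega
    rw [if_neg h1, if_neg (by simp)]

-- main A-side invariant: finishing A's loop from mid-run state = fold over the remaining runs
theorem pvMainA (threshold : Int) (l : List (String × String)) :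
    ∀ (x : String × String) (acc : List (String × String))
      (d : PySem.Dict String (Int × String)),
      acc ≠ [] → (∀ p ∈ acc, p.2 = x.2) →
      pvFlushA threshold
        (l.foldl (pvStepA threshold)
          (some x.2, (acc.length : Int), pvTs threshold acc.reverse, d)) =
      (pvRunsGo x acc l).foldl (pvStepRun threshold) d := by
  induction l with
  | nil =>
    intro x acc d hne hstk
    rw [List.foldl_nil, pvRunsGo, List.foldl_cons, List.foldl_nil]
    have := pvFlush_eq_stepRun threshold x.2 acc.reverse d (by simpa using hne)
      (by intro p hp; exact hstk p (List.mem_reverse.mp hp))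
    simpa using this
  | cons y ys ih =>
    intro x acc d hne hstk
    rw [List.foldl_cons, pvRunsGo]
    by_cases hy : y.2 = x.2
    · rw [if_pos hy]
      have hstep : pvStepA threshold (some x.2, (acc.length : Int), pvTs threshold acc.reverse, d) y
          = (some y.2, ((y :: acc).length : Int), pvTs threshold (y :: acc).reverse, d) := by
        rw [pvStepA, if_pos (by rw [hy])]
        have hrev : (y :: acc).reverse = acc.reverse ++ [y] := by simp
        rw [hrev, pvTs_snoc threshold acc.reverse y (by simpa using hne)]
        simp only [List.length_cons, List.length_reverse]
        push_cast
        rcases eq_or_ne ((acc.length : Int) + 1) threshold with h | h <;> simp [h]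
      rw [hstep]
      exact ih y (y :: acc) d (by simp) (by
        intro p hp
        rcases List.mem_cons.mp hp with h | h
        · rw [h]
        · rw [hstk p h, hy])
    · rw [if_neg hy, List.foldl_cons]
      have hstep : pvStepA threshold (some x.2, (acc.length : Int), pvTs threshold acc.reverse, d) y
          = (some y.2, (([y] : List (String × String)).length : Int), pvTs threshold ([y] : List (String × String)).reverse,
             pvStepRun threshold d acc.reverse) := by
        rw [pvStepA, if_neg (by simpa using hy)]
        rw [show pvTs threshold ([y] : List (String × String)).reverse = none by
          simpa using pvTs_singleton threshold y]
        have := pvFlush_eq_stepRun threshold x.2 acc.reverse d (by simpa using hne)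
          (by intro p hp; exact hstk p (List.mem_reverse.mp hp))
        rw [pvFlushA] at this
        simpa using this
      rw [hstep]
      exact ih y [y] (pvStepRun threshold d acc.reverse) (by simp) (by simp)

-- A's scanner produces exactly the maximal runs
theorem pvRunsGo_eq_cruns (l : List (String × String)) :
    ∀ (x : String × String) (acc : List (String × String)),
      pvRunsGo x acc l = (acc.reverse ++ (pvTakeRun x.2 l).1) :: pvCruns (pvTakeRun x.2 l).2 := by
  induction l with
  | nil => intro x acc; simp [pvRunsGo, pvTakeRun, pvCruns]
  | cons y ys ih =>
    intro x acc
    rw [pvRunsGo, pvTakeRun]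
    by_cases hy : y.2 = x.2
    · rw [if_pos hy, if_pos hy, ih y (y :: acc)]
      simp [hy]
    · rw [if_neg hy, if_neg hy, ih y [y], pvCruns]
      simp [pvTakeRun]

-- ---------- B-side: B's index fold = fold of pvStepRun over runs ----------

-- indexing past a constant-stock prefix
theorem pvGet_shift (r rest : List (String × String)) (j : Int) (hj : 0 ≤ j) :
    PySem.List.pyGet? (r ++ rest) ((r.length : Int) + j) = PySem.List.pyGet? rest j := by
  rw [PySem.List.pyGet?_of_nonneg _ (by omega), PySem.List.pyGet?_of_nonneg _ hj,
    show ((r.length : Int) + j).toNat = r.length + j.toNat from by omega,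
    List.getElem?_append_right (by omega)]
  congr 1
  omega

theorem pvStepIdx_shift (r rest : List (String × String)) (threshold : Int)
    (d : PySem.Dict String (Int × String)) (a b : Nat) :
    pvStepIdx (r ++ rest) threshold d (r.length + a, r.length + b) =
      pvStepIdx rest threshold d (a, b) := by
  rw [pvStepIdx, pvStepIdx]
  have hsub : ((r.length + b : Nat) : Int) - ((r.length + a : Nat) : Int) = (b : Int) - (a : Int) := by
    push_cast; ring
  rw [hsub]
  by_cases hc : 1 < threshold ∧ threshold ≤ (b : Int) - (a : Int)
  · rw [if_pos hc, if_pos hc,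
      show ((r.length + a : Nat) : Int) + threshold - 1 = (r.length : Int) + ((a : Int) + threshold - 1) from by push_cast; ring,
      pvGet_shift r rest _ (by omega),
      show ((r.length + a : Nat) : Int) = (r.length : Int) + (a : Int) from by push_cast; ring,
      pvGet_shift r rest _ (by omega)]
  · rw [if_neg hc, if_neg hc]

theorem pvStepIdx_first (r rest : List (String × String)) (threshold : Int)
    (d : PySem.Dict String (Int × String)) (hr : r ≠ []) :
    pvStepIdx (r ++ rest) threshold d (0, r.length) = pvStepRun threshold d r := by
  rw [pvStepIdx, pvStepRun]
  simp only [CharP.cast_eq_zero, sub_zero, zero_add]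
  by_cases hc : 1 < threshold ∧ threshold ≤ (r.length : Int)
  · have h0 : (0:Int) ≤ threshold - 1 := by omega
    have hi : (threshold - 1).toNat < r.length := by omega
    have hget : PySem.List.pyGet? (r ++ rest) (threshold - 1) = PySem.List.pyGet? r (threshold - 1) := by
      rw [PySem.List.pyGet?_of_nonneg _ h0, PySem.List.pyGet?_of_nonneg _ h0,
        List.getElem?_append_left hi]
    have hget0 : PySem.List.pyGet? (r ++ rest) (0 : Int) = some (r.headD ("", "")) := by
      cases r with
      | nil => exact absurd rfl hr
      | cons z zs => simp [PySem.List.pyGet?_zero_cons]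
    rw [if_pos hc, if_pos hc, hget, hget0]
    rfl
  · rw [if_neg hc, if_neg hc]

-- run starts of a run-decomposed list
theorem pvFilter_range_zero (m : Nat) (P : Nat → Bool) (hm : 0 < m)
    (h0 : P 0 = true) (h1 : ∀ i, 0 < i → i < m → P i = false) :
    (List.range m).filter P = [0] := by
  induction m with
  | zero => omega
  | succ k ih =>
    rw [List.range_succ, List.filter_append]
    rcases Nat.eq_zero_or_pos k with hk | hk
    · subst hk; simp [h0]
    · rw [ih hk (fun i hi hik => h1 i hi (by omega)),
        List.filter_cons, if_neg (by simp [h1 k hk (by omega)]), List.filter_nil, List.append_nil]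

theorem pvStartsF_decomp (r rest : List (String × String)) (hr : r ≠ [])
    (hconst : ∀ p ∈ r, p.2 = (r.headD ("", "")).2)
    (hb : rest = [] ∨ ((rest.headD ("", "")).2 ≠ (r.headD ("", "")).2)) :
    (List.range (r ++ rest).length).filter (pvAdjB (r ++ rest)) =
      0 :: ((List.range rest.length).filter (pvAdjB rest)).map (r.length + ·) := by
  have hrl : 0 < r.length := List.length_pos_iff.mpr hr
  rw [List.length_append, List.range_add, List.filter_append]
  have hpart1 : (List.range r.length).filter (pvAdjB (r ++ rest)) = [0] := by
    apply pvFilter_range_zero _ _ hrl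
    · simp [pvAdjB]
    · intro i hi him
      have hgi : (r ++ rest)[i]? = some r[i] := by
        rw [List.getElem?_append_left him, List.getElem?_eq_getElem him]
      have hgi1 : (r ++ rest)[i-1]? = some r[i-1] := by
        rw [List.getElem?_append_left (by omega), List.getElem?_eq_getElem (by omega : i - 1 < r.length)]
      simp only [pvAdjB, hgi, hgi1, Option.getD_some]
      have e1 := hconst r[i] (List.getElem_mem him)
      have e2 := hconst r[i-1] (List.getElem_mem (by omega : i - 1 < r.length))
      simp [e1, e2, Nat.pos_iff_ne_zero.mp hi]
  have hpart2 : ((List.range rest.length).map (r.length + ·)).filter (pvAdjB (r ++ rest)) =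
      ((List.range rest.length).filter (pvAdjB rest)).map (r.length + ·) := by
    rw [List.filter_map]
    congr 1
    apply List.filter_congr
    intro i hi
    have hilt : i < rest.length := List.mem_range.mp hi
    simp only [Function.comp_apply]
    rcases Nat.eq_zero_or_pos i with h0 | hpos
    · subst h0
      have hrest : rest ≠ [] := by intro h; rw [h] at hilt; simp at hilt
      have hgR : (r ++ rest)[r.length + 0]? = some (rest.headD ("", "")) := by
        rw [List.getElem?_append_right (by omega)]
        cases rest with
        | nil => exact absurd rfl hrest
        | cons z zs => simp
      have hgL : (r ++ rest)[r.length + 0 - 1]? = some (r.getLast hr) := by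
        rw [Nat.add_zero, List.getElem?_append_left (by omega),
          List.getElem?_eq_getElem (by omega : r.length - 1 < r.length)]
        rw [List.getLast_eq_getElem]
      have hlast : (r.getLast hr).2 = (r.headD ("", "")).2 :=
        hconst _ (List.getLast_mem hr)
      rcases hb with hb | hb
      · exact absurd hb hrest
      · have h2 : (r.length + 0 == 0) = false := by simp; omega
        have hne : (((r ++ rest)[r.length + 0]?).getD ("", "")).2 ≠ (((r ++ rest)[r.length + 0 - 1]?).getD ("", "")).2 := by
          rw [hgR, hgL, Option.getD_some, Option.getD_some, hlast]; exact hb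
        simp [pvAdjB]
        exact Or.inr (by simpa using hne)
    · have hgR : (r ++ rest)[r.length + i]? = rest[i]? := by
        rw [List.getElem?_append_right (by omega)]; congr 1; omega
      have hgL : (r ++ rest)[r.length + i - 1]? = rest[i-1]? := by
        rw [List.getElem?_append_right (by omega)]; congr 1; omega
      have h1 : (i == 0) = false := by simp; omega
      have h2 : (r.length + i == 0) = false := by simp; omega
      simp only [pvAdjB, hgR, hgL, h1, h2]
  rw [hpart1, hpart2]
  rfl

-- the (start, end) pair list of a list, as B computes it
def pvPairsOf (data : List (String × String)) : List (Nat × Nat) :=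
  let starts := ((List.range data.length).filter (pvAdjB data)) ++ [data.length]
  starts.zip (starts.drop 1)

theorem pvStartsF_head (data : List (String × String)) (hne : data ≠ []) :
    ∃ t, (List.range data.length).filter (pvAdjB data) = 0 :: t := by
  cases hl : data.length with
  | zero => exact absurd (List.length_eq_zero_iff.mp hl) hne
  | succ k =>
    rw [List.range_succ_eq_map, List.filter_cons, if_pos (by simp [pvAdjB])]
    exact ⟨_, rfl⟩

theorem pvPairsOf_decomp (r rest : List (String × String)) (hr : r ≠ [])
    (hconst : ∀ p ∈ r, p.2 = (r.headD ("", "")).2)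
    (hb : rest = [] ∨ ((rest.headD ("", "")).2 ≠ (r.headD ("", "")).2)) :
    pvPairsOf (r ++ rest) =
      (0, r.length) :: (pvPairsOf rest).map (fun q => (r.length + q.1, r.length + q.2)) := by
  have hdec := pvStartsF_decomp r rest hr hconst hb
  have hu : ∃ t, (List.range rest.length).filter (pvAdjB rest) ++ [rest.length] = 0 :: t := by
    cases hrest : rest with
    | nil => exact ⟨[], by simp⟩
    | cons z zs =>
      obtain ⟨t, ht⟩ := pvStartsF_head rest (by rw [hrest]; simp)
      rw [← hrest, ht]
      exact ⟨t ++ [rest.length], rfl⟩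
  obtain ⟨t, ht⟩ := hu
  rw [pvPairsOf, pvPairsOf, hdec]
  have hstarts : (0 :: ((List.range rest.length).filter (pvAdjB rest)).map (r.length + ·)) ++ [(r ++ rest).length]
      = 0 :: (((List.range rest.length).filter (pvAdjB rest)) ++ [rest.length]).map (r.length + ·) := by
    simp [List.length_append]
  rw [hstarts, ht]
  simp only [List.map_cons, Nat.add_zero, List.drop_succ_cons, List.drop_zero, List.zip_cons_cons]
  congr 1
  rw [show r.length :: List.map (fun x => r.length + x) t = List.map (fun x => r.length + x) (0 :: t) from by simp,
    List.zip_map]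
  simp [Prod.map]

theorem pvFoldIdx_congr (data data' : List (String × String)) (threshold : Int)
    (ps : List (Nat × Nat)) (f : Nat × Nat → Nat × Nat)
    (h : ∀ d q, pvStepIdx data threshold d (f q) = pvStepIdx data' threshold d q) :
    ∀ d, (ps.map f).foldl (pvStepIdx data threshold) d = ps.foldl (pvStepIdx data' threshold) d := by
  induction ps with
  | nil => intro d; rfl
  | cons q qs ih => intro d; rw [List.map_cons, List.foldl_cons, List.foldl_cons, h d q]; exact ih _

-- main B-side lemma: B's fold over (start,end) pairs = fold of pvStepRun over runs
theorem pvMainB (threshold : Int) :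
    ∀ (data : List (String × String)) (d : PySem.Dict String (Int × String)),
      (pvPairsOf data).foldl (pvStepIdx data threshold) d =
        (pvCruns data).foldl (pvStepRun threshold) d := by
  intro data
  induction data using pvCruns.induct with
  | case1 => intro d; simp [pvPairsOf, pvCruns]
  | case2 x xs ih =>
    intro d
    set a := (pvTakeRun x.2 xs).1 with ha
    set b := (pvTakeRun x.2 xs).2 with hbdef
    have hsplit : x :: xs = (x :: a) ++ b := by
      simp [ha, hbdef, pvTakeRun_append x.2 xs]
    have hconst : ∀ p ∈ (x :: a), p.2 = ((x :: a).headD ("", "")).2 := by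
      intro p hp
      rcases List.mem_cons.mp hp with h | h
      · rw [h]; rfl
      · rw [pvTakeRun_fst_stock x.2 xs p h]; rfl
    have hb : b = [] ∨ ((b.headD ("", "")).2 ≠ ((x :: a).headD ("", "")).2) :=
      pvTakeRun_snd_head x.2 xs
    rw [hsplit, pvPairsOf_decomp (x :: a) b (by simp) hconst hb, List.foldl_cons,
      pvStepIdx_first (x :: a) b threshold d (by simp),
      pvFoldIdx_congr ((x :: a) ++ b) b threshold (pvPairsOf b)
        (fun q => ((x :: a).length + q.1, (x :: a).length + q.2))
        (fun d' q => pvStepIdx_shift (x :: a) b threshold d' q.1 q.2),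
      ih]
    rw [show pvCruns ((x :: a) ++ b) = (x :: a) :: pvCruns b from by
      rw [← hsplit, pvCruns, ← ha, ← hbdef], List.foldl_cons]

-- ===== VERDICT (by name: the statement is the Claim_ definition above) =====
theorem check_consecutive_appearances_spec : Claim_equal_check_consecutive_appearances := by
  intro grouped_data threshold _ _
  unfold Spec_check_consecutive_appearances
  unfold check_consecutive_appearances check_consecutive_appearances_alt
  generalize (PySem.List.sorted2
    (grouped_data.flatMap (fun g => g.2.map (fun item =>
      (g.1, ((PySem.Dict.mk item).get? "stock").getD ""))))
    (fun p => p.1) (fun p => p.2)) = data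
  show (pvFlushA threshold (data.foldl (pvStepA threshold) (none, 0, none, PySem.Dict.empty))).items
      = ((((List.range data.length).filter (fun i => pvAdjB data i) ++ [data.length]).zip
          (((List.range data.length).filter (fun i => pvAdjB data i) ++ [data.length]).drop 1)).foldl
          (pvStepIdx data threshold) PySem.Dict.empty).items
  have hB : ((((List.range data.length).filter (fun i => pvAdjB data i) ++ [data.length]).zip
          (((List.range data.length).filter (fun i => pvAdjB data i) ++ [data.length]).drop 1)).foldl
          (pvStepIdx data threshold) PySem.Dict.empty)
      = (pvCruns data).foldl (pvStepRun threshold) PySem.Dict.empty := by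
    simpa [pvPairsOf] using pvMainB threshold data PySem.Dict.empty
  rw [hB]
  cases data with
  | nil => simp [pvFlushA, pvCruns]
  | cons x xs =>
    congr 1
    have hstep : pvStepA threshold (none, 0, none, PySem.Dict.empty) x
        = (some x.2, (([x] : List (String × String)).length : Int), pvTs threshold ([x] : List (String × String)).reverse, PySem.Dict.empty) := by
      rw [pvStepA, if_neg (by simp)]
      simpa using (pvTs_singleton threshold x).symm
    rw [List.foldl_cons, hstep,
      pvMainA threshold xs x [x] PySem.Dict.empty (by simp) (by simp),
      pvRunsGo_eq_cruns xs x [x],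
      show pvCruns (x :: xs) = (x :: (pvTakeRun x.2 xs).1) :: pvCruns (pvTakeRun x.2 xs).2 from by rw [pvCruns]]
    rfl
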